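-- pv_equiv track=rewrite | github.com/melikazmn/mabani-python | q7.melikazamani.-زیردنباله.py | zirdonbale
-- ===== SOURCE A (Python) =====
-- def zirdonbale(s,k):
--     lst = []
--     avalin  = ''
--
--     if k == 0:
--         return ['']
--
--     if k == 1:
--         for i in s:
--             lst.append(i)
--         return lst
--
--     for j in range(len(s)-k+1):
--         avalin += s[j]
--         for x in zirdonbale(s[j+1::],k-1):
--             lst.append(s[j] + x)
--
--     return lst
-- ===== SOURCE B (Python) =====
-- def zirdonbale(s, k):
--     # Bottom-up DP over suffixes: prev[i] = all length-c subsequences of s[i:],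
--     # computed for c = 1..k; avoids the exponential recomputation of A's recursion.
--     if k == 0:
--         return ['']
--     n = len(s)
--     if k > n:
--         return []   # no subsequence of s is that long
--     prev = [[''] for _ in range(n + 1)]   # length-0 subsequences of each suffix
--     for c in range(1, k + 1):
--         cur = [[] for _ in range(n + 1)]
--         for i in range(n - 1, -1, -1):
--             cur[i] = [s[i] + x for x in prev[i + 1]] + cur[i + 1]
--         prev = cur
--     return prev[0]
-- ===== Notes on version B (the rewrite author's own statement) =====
-- stated objective: faster
-- what changed: Replaces A's top-down recursion (which re-enumerates each suffix subproblem once per caller and scans the whole range even when k > len(s)) with a bottom-up DP table prev[i] = all length-c subsequences of s[i:] filled for c = 1..k, plus an immediate [] when k > len(s); intended as asymptotically faster, measured 3.03x at the largest size where both finish (the output itself is exponential in size, so both time out on large inputs).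
import Mathlib
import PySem

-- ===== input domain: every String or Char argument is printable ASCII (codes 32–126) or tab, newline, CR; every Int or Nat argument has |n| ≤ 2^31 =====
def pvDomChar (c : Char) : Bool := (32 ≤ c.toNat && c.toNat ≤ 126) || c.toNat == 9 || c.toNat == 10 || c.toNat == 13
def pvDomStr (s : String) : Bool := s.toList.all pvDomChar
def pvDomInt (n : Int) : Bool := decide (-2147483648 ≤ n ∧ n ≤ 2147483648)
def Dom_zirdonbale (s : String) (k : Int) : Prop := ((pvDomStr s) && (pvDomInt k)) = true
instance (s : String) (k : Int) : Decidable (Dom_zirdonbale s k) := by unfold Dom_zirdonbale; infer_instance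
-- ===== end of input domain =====

-- B replaces A's exponential recursion by a bottom-up DP over suffixes (each
-- (start,length) subproblem computed once); equal output for every k ≥ 0.

-- ===== PORT A =====
-- A's recursion on strings, done on List Char (strings rebuilt at the top);
-- the fuel argument only makes the recursion total: for k ≥ 0 the recursion
-- depth is k, so fuel k.toNat+1 is never exhausted (A raises for k < 0).
def zirdonbaleGo (fuel : Nat) (cs : List Char) (k : Int) : List (List Char) :=
  match fuel with
  | 0 => []
  | Nat.succ fuel' =>
    if k = 0 then [[]]
    else if k = 1 then
      -- for i in s: lst.append(i)
      cs.foldl (fun lst c => lst ++ [[c]]) []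
    else
      -- for j in range(len(s)-k+1): for x in zirdonbale(s[j+1:], k-1): lst.append(s[j] + x)
      (PySem.List.pyRange 0 ((cs.length : Int) - k + 1) 1).foldl
        (fun lst j =>
          (zirdonbaleGo fuel' (PySem.List.slice cs (some (j + 1)) none) (k - 1)).foldl
            (fun l x => l ++ [PySem.List.pyGetD cs j ' ' :: x]) lst)
        []

def zirdonbale (s : String) (k : Int) : List String :=
  (zirdonbaleGo (k.toNat + 1) s.toList k).map (fun cs => String.ofList cs)

-- ===== PORT B =====
-- one DP sweep: given prev (prev[i] = length-(c-1) subsequences of s[i:], a list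
-- indexed by suffix start i = 0..n), produce cur with cur[i] = length-c subsequences:
-- cur[i] = [s[i] + x for x in prev[i+1]] + cur[i+1], built from i = n downwards.
def altLevel : List Char → List (List (List Char)) → List (List (List Char))
  | [], _ => [[]]
  | c :: rest, prev =>
      let tl := altLevel rest prev.tail
      (((prev.tail.headD []).map (fun x => c :: x)) ++ tl.headD []) :: tl

-- the 'for c in range(1, k+1)' loop: apply altLevel m times
def altIter (cs : List Char) : Nat → List (List (List Char)) → List (List (List Char))
  | 0, prev => prev
  | Nat.succ m, prev => altIter cs m (altLevel cs prev)

def zirdonbale_alt (s : String) (k : Int) : List String :=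
  if k = 0 then [""]
  else if (s.toList.length : Int) < k then []
  else
    ((altIter s.toList k.toNat (List.replicate (s.toList.length + 1) [[]])).headD []).map
      (fun l => String.ofList l)

-- ===== PRECONDITION & SPEC =====
-- Pre_ excludes k < 0, where A raises IndexError (its recursion never reaches
-- the k == 0 / k == 1 base cases and eventually indexes into the empty string).
def Pre_zirdonbale (s : String) (k : Int) : Prop := 0 ≤ k
instance (s : String) (k : Int) : Decidable (Pre_zirdonbale s k) := by unfold Pre_zirdonbale; infer_instance
def pvWitness_zirdonbale : String × Int := ("ab", 1)

def Spec_zirdonbale (s : String) (k : Int) (out : List String) : Prop := out = zirdonbale_alt s k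
instance (s : String) (k : Int) (out : List String) : Decidable (Spec_zirdonbale s k out) := by unfold Spec_zirdonbale; infer_instance

-- ===== CLAIM (what is proved, stated in full; the proofs are below) =====
def Claim_equal_zirdonbale : Prop := ∀ (s : String) (k : Int), Dom_zirdonbale s k → Pre_zirdonbale s k → Spec_zirdonbale s k (zirdonbale s k)

-- ===== LEMMAS AND PROOFS =====

-- reference function: combinations of cs of length m, in A's (= lexicographic-by-index) order
def comb : List Char → Nat → List (List Char)
  | _, 0 => [[]]
  | [], _ + 1 => []
  | c :: rest, m + 1 => (comb rest m).map (fun x => c :: x) ++ comb rest (m + 1)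

theorem comb_zero (cs : List Char) : comb cs 0 = [[]] := by
  cases cs <;> rfl

theorem comb_eq_nil_of_lt (cs : List Char) (m : Nat) (h : cs.length < m) : comb cs m = [] := by
  induction cs generalizing m with
  | nil => cases m with
    | zero => omega
    | succ m => rfl
  | cons c rest ih =>
    cases m with
    | zero => simp at h
    | succ m =>
      show (comb rest m).map (fun x => c :: x) ++ comb rest (m + 1) = []
      rw [ih m (by simp at h; omega), ih (m+1) (by simp at h; omega)]
      rfl

theorem comb_one (cs : List Char) : comb cs 1 = cs.map (fun c => [c]) := by
  induction cs with
  | nil => rfl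
  | cons c rest ih => simp [comb, ih]

-- rows of the DP table: rowsOf m cs = [comb (suffix i) m]_{i=0..|cs|}
def rowsOf (m : Nat) : List Char → List (List (List Char))
  | [] => [comb [] m]
  | c :: rest => comb (c :: rest) m :: rowsOf m rest

theorem headD_rowsOf (m : Nat) (cs : List Char) : (rowsOf m cs).headD [] = comb cs m := by
  cases cs <;> rfl

theorem altLevel_rowsOf (m : Nat) (cs : List Char) :
    altLevel cs (rowsOf m cs) = rowsOf (m + 1) cs := by
  induction cs with
  | nil =>
    show [[]] = [comb [] (m+1)]
    rfl
  | cons c rest ih =>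
    show (((rowsOf m rest).headD []).map (fun x => c :: x) ++ (altLevel rest (rowsOf m rest)).headD []) ::
        altLevel rest (rowsOf m rest) = rowsOf (m+1) (c :: rest)
    rw [ih, headD_rowsOf, headD_rowsOf]
    rfl

theorem replicate_eq_rowsOf_zero (cs : List Char) :
    List.replicate (cs.length + 1) ([[]] : List (List Char)) = rowsOf 0 cs := by
  induction cs with
  | nil => rfl
  | cons c rest ih => simp only [List.length_cons, List.replicate_succ] at *; rw [ih]; rfl

theorem altIter_rowsOf (cs : List Char) (m j : Nat) :
    altIter cs m (rowsOf j cs) = rowsOf (j + m) cs := by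
  induction m generalizing j with
  | zero => rfl
  | succ m ih =>
    show altIter cs m (altLevel cs (rowsOf j cs)) = _
    rw [altLevel_rowsOf, ih (j + 1)]
    congr 1
    omega

theorem alt_eq_comb (s : String) (k : Int) (hk : 0 ≤ k) :
    zirdonbale_alt s k = (comb s.toList k.toNat).map (fun cs => String.ofList cs) := by
  unfold zirdonbale_alt
  by_cases h0 : k = 0
  · subst h0
    rw [if_pos rfl, Int.toNat_zero, comb_zero]
    rfl
  · rw [if_neg h0]
    by_cases h2 : (s.toList.length : Int) < k
    · rw [if_pos h2, comb_eq_nil_of_lt s.toList k.toNat (by omega), List.map_nil]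
    · rw [if_neg h2, replicate_eq_rowsOf_zero, altIter_rowsOf, Nat.zero_add, headD_rowsOf]

-- A's loop body, characterised: comb at m+1 is the concatenation over start
-- positions j of (s[j] prepended to each length-m combination of s[j+1:])
theorem comb_succ_flatMap (m : Nat) (cs : List Char) :
    comb cs (m + 1) =
      (List.range (cs.length + 1 - (m + 1))).flatMap
        (fun j => (comb (cs.drop (j + 1)) m).map (fun x => cs.getD j ' ' :: x)) := by
  induction cs with
  | nil =>
    have h0 : ([] : List Char).length + 1 - (m + 1) = 0 := by simp
    rw [h0]
    rfl
  | cons c rest ih =>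
    show (comb rest m).map (fun x => c :: x) ++ comb rest (m + 1) = _
    by_cases hm : rest.length < m
    · rw [comb_eq_nil_of_lt rest m hm, comb_eq_nil_of_lt rest (m+1) (by omega)]
      have : (c :: rest).length + 1 - (m + 1) = 0 := by simp; omega
      rw [this]
      rfl
    · have hN : (c :: rest).length + 1 - (m + 1) = (rest.length + 1 - (m + 1)) + 1 := by
        simp; omega
      rw [hN, List.range_succ_eq_map, List.flatMap_cons, List.flatMap_map]
      simp only [List.drop_succ_cons, List.drop_zero, List.getD_cons_zero, List.getD_cons_succ]
      rw [← ih]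

-- A computes comb whenever k ≥ 0 and the fuel exceeds k
theorem go_eq_comb (fuel : Nat) (cs : List Char) (k : Int) (hk : 0 ≤ k)
    (hf : k.toNat < fuel) : zirdonbaleGo fuel cs k = comb cs k.toNat := by
  induction fuel generalizing cs k with
  | zero => omega
  | succ fuel' ih =>
    unfold zirdonbaleGo
    by_cases h0 : k = 0
    · subst h0
      rw [if_pos rfl, Int.toNat_zero, comb_zero]
    · by_cases h1 : k = 1
      · subst h1
        rw [if_neg h0, if_pos rfl, PySem.List.foldl_append_singleton_eq_map, Int.toNat_one, comb_one]
        rfl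
      · have hk2 : 2 ≤ k := by omega
        rw [if_neg h0, if_neg h1]
        -- inner loop: lst ++ map over the recursive call
        simp only [PySem.List.foldl_append_singleton_eq_map]
        rw [PySem.List.foldl_append_eq_flatMap, List.nil_append, PySem.List.pyRange_one,
          List.flatMap_map]
        have hM : (((cs.length : Int) - k + 1) - 0).toNat = cs.length + 1 - k.toNat := by omega
        rw [hM]
        have hkm : k.toNat = (k - 1).toNat + 1 := by omega
        rw [hkm, comb_succ_flatMap]
        apply List.flatMap_congr  -- congruence over j ∈ range
        intro j _
        rw [PySem.List.slice_from cs (by omega : (0:Int) ≤ 0 + (j:Int) + 1)]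
        have hj1 : ((0 : Int) + (j:Int) + 1).toNat = j + 1 := by omega
        rw [hj1]
        have hrec := ih (cs.drop (j+1)) (k - 1) (by omega) (by omega)
        rw [hrec]
        have : PySem.List.pyGetD cs ((0:Int) + (j:Int)) ' ' = cs.getD j ' ' := by
          have : (0:Int) + (j:Int) = (j:Int) := by omega
          rw [this, PySem.List.pyGetD_natCast]
        rw [this]

-- ===== VERDICT (by name: the statement is the Claim_ definition above) =====
theorem zirdonbale_spec : Claim_equal_zirdonbale := by
  intro s k _ hk
  show zirdonbale s k = zirdonbale_alt s k
  unfold zirdonbale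
  rw [go_eq_comb (k.toNat + 1) s.toList k hk (by omega), alt_eq_comb s k hk]
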